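-- pv_equiv track=rewrite | github.com/ricoantoniorandrianarivelo/Chatbot-torolalana | backend/debug_nlp.py | _aggregate_data
-- ===== SOURCE A (Python) =====
-- def _aggregate_data(data, url_key):
--     aggregated = {}
--     for item in data:
--         url = item.get(url_key)
--         if not url: continue
--         if url not in aggregated:
--             aggregated[url] = {"title": item.get("service_title", item.get("title", "")), "description": item.get("description", ""), "text": "", "url": url}
--         if "text" in item: aggregated[url]["text"] += " " + item["text"]
--     return aggregated
-- ===== SOURCE B (Python) =====
-- def _aggregate_data(data, url_key):
--     # Pass 1: group the items by their (truthy) url, in first-seen order.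
--     groups = {}
--     for item in data:
--         url = item.get(url_key)
--         if url:
--             groups.setdefault(url, []).append(item)
--     # Pass 2: render one record per group.
--     result = {}
--     for url, group in groups.items():
--         first = group[0]
--         text = ""
--         for it in group:
--             if "text" in it:
--                 text += " " + it["text"]
--         result[url] = {
--             "title": first.get("service_title", first.get("title", "")),
--             "description": first.get("description", ""),
--             "text": text,
--             "url": url,
--         }
--     return result
-- ===== Notes on version B (the rewrite author's own statement) =====
-- stated objective: alternative
-- what changed: A builds every record incrementally inside one fused loop (insert-or-update per item); B first groups the items by truthy url into an ordered mapping and then renders each record from its whole group in a second pass.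
import Mathlib
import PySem

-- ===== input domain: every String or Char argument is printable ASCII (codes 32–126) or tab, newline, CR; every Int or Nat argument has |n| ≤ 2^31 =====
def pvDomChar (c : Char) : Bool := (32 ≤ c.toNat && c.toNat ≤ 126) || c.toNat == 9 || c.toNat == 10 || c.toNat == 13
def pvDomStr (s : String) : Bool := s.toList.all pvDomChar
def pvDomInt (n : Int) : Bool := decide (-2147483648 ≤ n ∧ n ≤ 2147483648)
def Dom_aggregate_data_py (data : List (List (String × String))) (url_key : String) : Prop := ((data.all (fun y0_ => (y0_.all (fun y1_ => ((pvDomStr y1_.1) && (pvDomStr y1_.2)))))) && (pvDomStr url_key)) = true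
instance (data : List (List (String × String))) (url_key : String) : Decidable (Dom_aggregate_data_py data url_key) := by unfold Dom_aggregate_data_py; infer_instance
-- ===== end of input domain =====

-- B replaces A's fused insert-or-update loop by a two-pass decomposition: group items by
-- truthy url first, then render each record from its whole group. Equal return values proved.

-- ===== PORT A =====
-- the dict literal A assigns on first sight of a url
def pvInitRec (item : List (String × String)) (url : String) : PySem.Dict String String :=
  PySem.Dict.mk
    [("title", ((PySem.Dict.mk item).get? "service_title").getD
        (((PySem.Dict.mk item).get? "title").getD "")),
     ("description", ((PySem.Dict.mk item).get? "description").getD ""),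
     ("text", ""),
     ("url", url)]

-- A's loop body
def pvAggStep (url_key : String) (agg : PySem.Dict String (PySem.Dict String String))
    (item : List (String × String)) : PySem.Dict String (PySem.Dict String String) :=
  match (PySem.Dict.mk item).get? url_key with
  | none => agg
  | some url =>
    if url = "" then agg
    else
      let agg1 := if agg.contains url then agg else agg.insert url (pvInitRec item url)
      if (PySem.Dict.mk item).contains "text" then
        agg1.modify url (PySem.Dict.mk [])
          (fun d => d.modify "text" ""
            (fun t => t ++ (" " ++ (((PySem.Dict.mk item).get? "text").getD ""))))
      else agg1

def aggregate_data_py (data : List (List (String × String))) (url_key : String) :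
    List (String × List (String × String)) :=
  ((data.foldl (pvAggStep url_key) (PySem.Dict.mk [])).items).map (fun p => (p.1, p.2.items))

-- ===== PORT B =====
-- B's grouping pass: groups.setdefault(url, []).append(item)
def pvGroupStep (url_key : String) (groups : PySem.Dict String (List (List (String × String))))
    (item : List (String × String)) : PySem.Dict String (List (List (String × String))) :=
  match (PySem.Dict.mk item).get? url_key with
  | none => groups
  | some url => if url = "" then groups else groups.modify url [] (· ++ [item])

-- B's inner text loop over one group
def pvTextOf (g : List (List (String × String))) : String :=
  g.foldl
    (fun t it =>
      if (PySem.Dict.mk it).contains "text" then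
        t ++ (" " ++ (((PySem.Dict.mk it).get? "text").getD ""))
      else t) ""

-- B's rendering of one group into a record
def pvRecord (url : String) (g : List (List (String × String))) : List (String × String) :=
  let first := PySem.List.pyGetD g 0 []
  [("title", ((PySem.Dict.mk first).get? "service_title").getD
      (((PySem.Dict.mk first).get? "title").getD "")),
   ("description", ((PySem.Dict.mk first).get? "description").getD ""),
   ("text", pvTextOf g),
   ("url", url)]

def aggregate_data_py_alt (data : List (List (String × String))) (url_key : String) :
    List (String × List (String × String)) :=
  ((data.foldl (pvGroupStep url_key) (PySem.Dict.mk [])).items).map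
    (fun p => (p.1, pvRecord p.1 p.2))

-- ===== PRECONDITION & SPEC =====
def Spec_aggregate_data_py (data : List (List (String × String))) (url_key : String) (out : List (String × List (String × String))) : Prop := out = aggregate_data_py_alt data url_key
instance (data : List (List (String × String))) (url_key : String) (out : List (String × List (String × String))) : Decidable (Spec_aggregate_data_py data url_key out) := by unfold Spec_aggregate_data_py; infer_instance

-- ===== CLAIM (what is proved, stated in full; the proofs are below) =====
def Claim_equal_aggregate_data_py : Prop := ∀ (data : List (List (String × String))) (url_key : String), Dom_aggregate_data_py data url_key → Spec_aggregate_data_py data url_key (aggregate_data_py data url_key)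

-- ===== LEMMAS AND PROOFS =====

-- rendering a group-dict entry into an aggregated-dict entry
def pvF : (String × List (List (String × String))) → (String × PySem.Dict String String) :=
  fun p => (p.1, PySem.Dict.mk (pvRecord p.1 p.2))

theorem pv_find?_map_pvF (l : List (String × List (List (String × String)))) (k : String) :
    List.find? (fun p => p.1 == k) (l.map pvF)
      = (List.find? (fun p => p.1 == k) l).map pvF := by
  induction l with
  | nil => rfl
  | cons a t ih =>
    by_cases h : a.1 = k
    · simp [pvF, List.find?_cons_of_pos, h]
    · have hb : (a.1 == k) = false := by simpa using h
      simp [pvF, List.find?, hb, ih]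

theorem pv_find?_unique {α : Type} (l : List (String × α))
    (hnd : (l.map (·.1)).Nodup) (k : String) (p0 : String × α)
    (h : List.find? (fun p => p.1 == k) l = some p0) :
    ∀ q ∈ l, q.1 = k → q = p0 := by
  induction l with
  | nil => simp at h
  | cons a t ih =>
    simp only [List.map_cons, List.nodup_cons] at hnd
    intro q hq hqk
    by_cases ha : a.1 = k
    · rw [List.find?_cons_of_pos (by simpa using ha)] at h
      injection h with h
      subst h
      rcases List.mem_cons.mp hq with rfl | hq
      · rfl
      · exact absurd (by rw [ha, ← hqk]; exact List.mem_map_of_mem hq) hnd.1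
    · rw [List.find?_cons_of_neg (by simpa using ha)] at h
      rcases List.mem_cons.mp hq with rfl | hq
      · exact absurd hqk ha
      · exact ih hnd.2 h q hq hqk

-- fresh group: A's freshly inserted (and possibly text-extended) record is B's record of [item]
theorem pv_rec_singleton (url : String) (item : List (String × String)) :
    (if (PySem.Dict.mk item).contains "text" then
        (pvInitRec item url).modify "text" ""
          (fun t => t ++ (" " ++ (((PySem.Dict.mk item).get? "text").getD "")))
      else pvInitRec item url)
    = PySem.Dict.mk (pvRecord url [item]) := by
  by_cases h : (item.any fun p => p.1 == "text") = true <;>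
    simp [h, pvInitRec, pvRecord, pvTextOf, PySem.Dict.modify, PySem.Dict.insert,
      PySem.Dict.getD, PySem.Dict.get?, PySem.Dict.contains, PySem.List.pyGetD_zero_cons,
      List.find?]

-- existing group: extending A's record's text = B's record of the extended group
theorem pv_rec_append (url : String) (g : List (List (String × String)))
    (item : List (String × String)) (hg : g ≠ [])
    (h : (PySem.Dict.mk item).contains "text" = true) :
    (PySem.Dict.mk (pvRecord url g)).modify "text" ""
        (fun t => t ++ (" " ++ (((PySem.Dict.mk item).get? "text").getD "")))
      = PySem.Dict.mk (pvRecord url (g ++ [item])) := by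
  simp only [PySem.Dict.contains] at h
  cases g with
  | nil => exact absurd rfl hg
  | cons a t =>
    simp [pvRecord, pvTextOf, PySem.Dict.modify, PySem.Dict.insert, PySem.Dict.getD,
      PySem.Dict.get?, PySem.Dict.contains, PySem.List.pyGetD_zero_cons, List.cons_append,
      List.find?, List.foldl_append, h]

-- existing group, no text in item: B's record of the extended group is unchanged
theorem pv_rec_append_notext (url : String) (g : List (List (String × String)))
    (item : List (String × String)) (hg : g ≠ [])
    (h : (PySem.Dict.mk item).contains "text" = false) :
    PySem.Dict.mk (pvRecord url (g ++ [item])) = PySem.Dict.mk (pvRecord url g) := by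
  simp only [PySem.Dict.contains] at h
  cases g with
  | nil => exact absurd rfl hg
  | cons a t =>
    simp [pvRecord, pvTextOf, PySem.List.pyGetD_zero_cons, List.cons_append,
      List.foldl_append, h]

-- replacing at a key keeps the key list
theorem pv_keys_map_replace {ν : Type} (l : List (String × ν)) (url : String) (v : ν) :
    (l.map (fun p => if p.1 == url then (url, v) else p)).map (·.1) = l.map (·.1) := by
  rw [List.map_map]
  exact List.map_congr_left (fun p hp => by by_cases h : p.1 = url <;> simp [h])

-- replacing at an absent key does nothing
theorem pv_replace_id {ν : Type} (l : List (String × ν)) (url : String) (v : ν)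
    (h : (l.any (fun p => p.1 == url)) = false) :
    l.map (fun p => if p.1 == url then (url, v) else p) = l := by
  have h' := List.any_eq_false.mp h
  conv_rhs => rw [← List.map_id l]
  exact List.map_congr_left (fun p hp => by simp [by simpa using h' p hp])

-- one loop step preserves the invariant
theorem pv_step_inv (url_key : String) (item : List (String × String))
    (agg : PySem.Dict String (PySem.Dict String String))
    (grp : PySem.Dict String (List (List (String × String))))
    (hmap : agg.items = grp.items.map pvF)
    (hne : ∀ p ∈ grp.items, p.2 ≠ [])
    (hnd : (grp.items.map (·.1)).Nodup) :
    (pvAggStep url_key agg item).items = (pvGroupStep url_key grp item).items.map pvF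
    ∧ (∀ p ∈ (pvGroupStep url_key grp item).items, p.2 ≠ [])
    ∧ ((pvGroupStep url_key grp item).items.map (·.1)).Nodup := by
  cases hget : (PySem.Dict.mk item).get? url_key with
  | none =>
    have hA : pvAggStep url_key agg item = agg := by simp [pvAggStep, hget]
    have hB : pvGroupStep url_key grp item = grp := by simp [pvGroupStep, hget]
    rw [hA, hB]; exact ⟨hmap, hne, hnd⟩
  | some url =>
    by_cases hurl : url = ""
    · have hA : pvAggStep url_key agg item = agg := by simp [pvAggStep, hget, hurl]
      have hB : pvGroupStep url_key grp item = grp := by simp [pvGroupStep, hget, hurl]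
      rw [hA, hB]; exact ⟨hmap, hne, hnd⟩
    have hB : pvGroupStep url_key grp item = grp.modify url [] (· ++ [item]) := by
      simp [pvGroupStep, hget, hurl]
    have hA : pvAggStep url_key agg item =
        (if (PySem.Dict.mk item).contains "text" = true then
          (if agg.contains url = true then agg else agg.insert url (pvInitRec item url)).modify
            url (PySem.Dict.mk [])
            (fun d => d.modify "text" ""
              (fun t => t ++ (" " ++ (((PySem.Dict.mk item).get? "text").getD ""))))
        else (if agg.contains url = true then agg else agg.insert url (pvInitRec item url))) := by
      simp [pvAggStep, hget, hurl]
    rw [hA, hB]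
    have hcA : agg.contains url = grp.contains url := by
      simp [PySem.Dict.contains, hmap, List.any_map, Function.comp_def, pvF]
    by_cases hc : grp.contains url = true
    · -- url already grouped
      obtain ⟨p0, hfind⟩ : ∃ p0, List.find? (fun p => p.1 == url) grp.items = some p0 := by
        have : (List.find? (fun p => p.1 == url) grp.items).isSome := by
          rw [List.find?_isSome]
          simpa [PySem.Dict.contains, List.any_eq_true] using hc
        exact Option.isSome_iff_exists.mp this
      have hp0mem : p0 ∈ grp.items := List.mem_of_find?_eq_some hfind
      have hp0key : p0.1 = url := by
        have := List.find?_some hfind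
        simpa using this
      have hgd : grp.getD url [] = p0.2 := by
        simp [PySem.Dict.getD, PySem.Dict.get?, hfind]
      have haggD : agg.getD url (PySem.Dict.mk []) = PySem.Dict.mk (pvRecord url p0.2) := by
        simp only [PySem.Dict.getD, PySem.Dict.get?, hmap, pv_find?_map_pvF, hfind,
          Option.map_some, Option.getD_some, pvF, hp0key]
      have hitemsB :
          (grp.modify url [] (· ++ [item])).items
            = grp.items.map (fun p => if p.1 == url then (url, p0.2 ++ [item]) else p) := by
        simp only [PySem.Dict.modify]
        rw [PySem.Dict.items_insert_of_contains _ _ hc, hgd]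
      have hb2 : ∀ p ∈ (grp.modify url [] (· ++ [item])).items, p.2 ≠ [] := by
        rw [hitemsB]
        intro p hp
        obtain ⟨q, hq, hqe⟩ := List.mem_map.mp hp
        by_cases h : q.1 = url <;> simp [h] at hqe <;> subst hqe
        · simp
        · exact hne q hq
      have hb3 : ((grp.modify url [] (· ++ [item])).items.map (·.1)).Nodup := by
        rw [hitemsB, pv_keys_map_replace]
        exact hnd
      have houter : agg.modify url (PySem.Dict.mk [])
            (fun d => d.modify "text" ""
              (fun t => t ++ (" " ++ (((PySem.Dict.mk item).get? "text").getD ""))))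
          = agg.insert url ((agg.getD url (PySem.Dict.mk [])).modify "text" ""
              (fun t => t ++ (" " ++ (((PySem.Dict.mk item).get? "text").getD "")))) := rfl
      rw [hcA, if_pos hc]
      by_cases ht : (PySem.Dict.mk item).contains "text" = true
      · rw [if_pos ht]
        refine ⟨?_, hb2, hb3⟩
        rw [houter, haggD, pv_rec_append url p0.2 item (hne p0 hp0mem) ht,
          PySem.Dict.items_insert_of_contains _ _ (hcA.trans hc), hitemsB, hmap,
          List.map_map, List.map_map]
        refine List.map_congr_left (fun q hq => ?_)
        by_cases h : q.1 = url
        · simp [pvF, h]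
        · simp [pvF, h]
      · rw [if_neg ht]
        refine ⟨?_, hb2, hb3⟩
        rw [hmap, hitemsB, List.map_map]
        refine List.map_congr_left (fun q hq => ?_)
        by_cases h : q.1 = url
        · have hq0 : q = p0 := pv_find?_unique grp.items hnd url p0 hfind q hq h
          have hne' := pv_rec_append_notext url p0.2 item (hne p0 hp0mem)
            (Bool.eq_false_iff.mpr ht)
          simp [pvF, hq0, hne'.symm, hp0key]
        · simp [pvF, h]
    · -- fresh url
      have hc' : grp.contains url = false := by simpa using hc
      have hgd : grp.getD url [] = [] :=
        PySem.Dict.getD_of_not_contains _ _ hc'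
      have hitemsB :
          (grp.modify url [] (· ++ [item])).items = grp.items ++ [(url, [item])] := by
        simp only [PySem.Dict.modify]
        rw [PySem.Dict.items_insert_of_not_contains _ _ hc', hgd]
        rfl
      have hb2 : ∀ p ∈ (grp.modify url [] (· ++ [item])).items, p.2 ≠ [] := by
        rw [hitemsB]
        intro p hp
        rcases List.mem_append.mp hp with h | h
        · exact hne p h
        · simp at h; subst h; simp
      have hall : ∀ p ∈ grp.items, p.1 ≠ url := by
        intro p hp hpe
        have hcon : grp.contains url = true := by
          simp only [PySem.Dict.contains, List.any_eq_true]
          exact ⟨p, hp, by simp [hpe]⟩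
        simp [hcon] at hc'
      have hb3 : ((grp.modify url [] (· ++ [item])).items.map (·.1)).Nodup := by
        rw [hitemsB, List.map_append]
        refine List.Nodup.append hnd (by simp) ?_
        intro a ha hb
        rw [List.map_singleton, List.mem_singleton] at hb
        obtain ⟨q, hq, hq1⟩ := List.mem_map.mp ha
        exact hall q hq (hq1.trans hb)
      rw [hcA, if_neg hc, hitemsB]
      have hinsA : (agg.insert url (pvInitRec item url)).items
          = agg.items ++ [(url, pvInitRec item url)] :=
        PySem.Dict.items_insert_of_not_contains _ _ (hcA.trans hc')
      by_cases ht : (PySem.Dict.mk item).contains "text" = true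
      · rw [if_pos ht]
        refine ⟨?_, hitemsB ▸ hb2, hitemsB ▸ hb3⟩
        have hcontains1 : (agg.insert url (pvInitRec item url)).contains url = true := by
          simp [pysem]
        have hgetD1 : (agg.insert url (pvInitRec item url)).getD url (PySem.Dict.mk [])
            = pvInitRec item url := by simp [pysem]
        have houter : (agg.insert url (pvInitRec item url)).modify url (PySem.Dict.mk [])
              (fun d => d.modify "text" ""
                (fun t => t ++ (" " ++ (((PySem.Dict.mk item).get? "text").getD ""))))
            = (agg.insert url (pvInitRec item url)).insert url
                (((agg.insert url (pvInitRec item url)).getD url (PySem.Dict.mk [])).modify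
                  "text" ""
                  (fun t => t ++ (" " ++ (((PySem.Dict.mk item).get? "text").getD "")))) := rfl
        rw [houter, hgetD1, PySem.Dict.items_insert_of_contains _ _ hcontains1, hinsA]
        rw [List.map_append, pv_replace_id _ _ _ (hcA.trans hc')]
        have hsing := pv_rec_singleton url item
        rw [if_pos ht] at hsing
        simp [hmap, pvF, hsing]
      · rw [if_neg ht]
        refine ⟨?_, hitemsB ▸ hb2, hitemsB ▸ hb3⟩
        have hsing := pv_rec_singleton url item
        rw [if_neg ht] at hsing
        rw [hinsA]
        simp [hmap, pvF, hsing]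

theorem pv_fold_inv (data : List (List (String × String))) (url_key : String)
    (agg : PySem.Dict String (PySem.Dict String String))
    (grp : PySem.Dict String (List (List (String × String))))
    (hmap : agg.items = grp.items.map pvF)
    (hne : ∀ p ∈ grp.items, p.2 ≠ [])
    (hnd : (grp.items.map (·.1)).Nodup) :
    (data.foldl (pvAggStep url_key) agg).items
      = (data.foldl (pvGroupStep url_key) grp).items.map pvF := by
  induction data generalizing agg grp with
  | nil => simpa using hmap
  | cons item rest ih =>
    obtain ⟨h1, h2, h3⟩ := pv_step_inv url_key item agg grp hmap hne hnd
    exact ih _ _ h1 h2 h3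

-- ===== VERDICT (by name: the statement is the Claim_ definition above) =====
theorem aggregate_data_py_spec : Claim_equal_aggregate_data_py := by
  intro data url_key _
  unfold Spec_aggregate_data_py aggregate_data_py aggregate_data_py_alt
  rw [pv_fold_inv data url_key (PySem.Dict.mk []) (PySem.Dict.mk []) rfl (by simp) (by simp)]
  simp [pvF]
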